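-- pv_equiv track=rewrite | github.com/cphayash/daily_coding_problems | python/Problem_172_[Medium].py | startingIndices
-- ===== SOURCE A (Python) =====
-- from typing import List
--
-- def startingIndices(s, words) -> List[int]:
--     results = []
--
--     if not words:
--         return results
--
--     wordsSet = set(words)
--
--     wordLen = len(words[0])
--
--     prevWord = None
--     i = 0
--     while i < len(s):
--         cur = s[i:i+wordLen]
--         if cur in wordsSet:
--             if not prevWord:
--                 results.append(i)
--             prevWord = cur
--             i += wordLen - 1
--         if cur not in wordsSet:
--             prevWord = None
--         i += 1
--
--     return results
-- ===== SOURCE B (Python) =====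
-- def startingIndices(s, words):
--     if not words:
--         return []
--     wordsSet = set(words)
--     wordLen = len(words[0])
--     n = len(s)
--     match = [s[i:i + wordLen] in wordsSet for i in range(n)]
--     results = []
--     i = 0
--     while i < n:
--         if match[i]:
--             results.append(i)
--             i += wordLen
--             while i < n and match[i]:
--                 i += wordLen
--         else:
--             i += 1
--     return results
-- ===== Notes on version B (the rewrite author's own statement) =====
-- stated objective: alternative
-- what changed: B precomputes a boolean match table for every window position in one pass and then replays the scan as a plain nested loop (outer scan, inner chain-skip) over the table, eliminating A's prevWord state machine and its i += wordLen-1 index arithmetic; Pre_ excludes inputs whose first word is the empty string while s is nonempty, on which A loops forever (wordLen = 0 keeps i fixed) and B does too.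
import Mathlib
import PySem

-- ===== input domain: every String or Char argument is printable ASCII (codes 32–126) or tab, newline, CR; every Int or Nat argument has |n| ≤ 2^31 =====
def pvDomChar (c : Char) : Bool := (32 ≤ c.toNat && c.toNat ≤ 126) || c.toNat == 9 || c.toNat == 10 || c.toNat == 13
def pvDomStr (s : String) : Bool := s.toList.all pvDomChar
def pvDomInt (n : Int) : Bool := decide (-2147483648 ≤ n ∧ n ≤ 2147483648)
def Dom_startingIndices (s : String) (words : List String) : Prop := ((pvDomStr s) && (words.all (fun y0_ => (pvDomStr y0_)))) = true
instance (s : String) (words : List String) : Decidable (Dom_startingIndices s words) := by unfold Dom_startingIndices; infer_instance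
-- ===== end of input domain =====

-- B replaces A's one-pass prevWord state machine by a precomputed window-match table
-- consulted by a plain nested loop (alternative decomposition, same cost).


-- ===== PORT A =====
-- the while loop of A; fuel = len(s)+1 is enough: each iteration increases i by 1
-- (no match) or by wordLen ≥ 1 (match) on every input admitted by Pre_
def pvLoopA (s : String) (S : PySem.Set String) (L n : Int) :
    Nat → Int → Option String → List Int
  | 0, _, _ => []
  | f + 1, i, prev =>
    if i < n then
      let cur := PySem.Str.slice s (some i) (some (i + L))
      if S.contains cur then
        -- "if not prevWord: results.append(i)"; prevWord is falsy iff None or ""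
        (if prev.getD "" = "" then [i] else []) ++
          pvLoopA s S L n f (i + (L - 1) + 1) (some cur)
      else
        pvLoopA s S L n f (i + 1) none
    else []

def startingIndices (s : String) (words : List String) : List Int :=
  match words with
  | [] => []
  | w :: _ =>
    pvLoopA s (PySem.Set.ofList words) (PySem.Str.len w) (PySem.Str.len s)
      (s.toList.length + 1) 0 none

-- ===== PORT B =====
-- match = [s[i:i+wordLen] in wordsSet for i in range(n)]
def pvMatchB (s : String) (S : PySem.Set String) (L : Int) : List Bool :=
  (List.range s.toList.length).map
    (fun (k : Nat) => S.contains (PySem.Str.slice s (some (k : Int)) (some ((k : Int) + L))))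

-- inner "while i < n and match[i]: i += wordLen"; fuel n+1 is enough under Pre_
def pvChainB (n L : Int) (m : List Bool) : Nat → Int → Int
  | 0, i => i
  | f + 1, i =>
    if i < n ∧ PySem.List.pyGetD m i false = true then pvChainB n L m f (i + L) else i

-- outer "while i < n"; fuel n+1 is enough under Pre_ (i strictly increases)
def pvLoopB (n L : Int) (m : List Bool) : Nat → Int → List Int
  | 0, _ => []
  | f + 1, i =>
    if i < n then
      if PySem.List.pyGetD m i false then
        i :: pvLoopB n L m f (pvChainB n L m (m.length + 1) (i + L))
      else
        pvLoopB n L m f (i + 1)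
    else []

def startingIndices_alt (s : String) (words : List String) : List Int :=
  match words with
  | [] => []
  | w :: _ =>
    let S := PySem.Set.ofList words
    let L := PySem.Str.len w
    let m := pvMatchB s S L
    pvLoopB (PySem.Str.len s) L m (m.length + 1) 0

-- ===== PRECONDITION & SPEC =====
-- Pre_ excludes inputs whose first word is the empty string while s is nonempty:
-- there wordLen = 0 keeps i fixed and A loops forever (B does too).
def Pre_startingIndices (s : String) (words : List String) : Prop :=
  words = [] ∨ s.toList = [] ∨ 1 ≤ PySem.Str.len (words.headD "")
instance (s : String) (words : List String) : Decidable (Pre_startingIndices s words) := by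
  unfold Pre_startingIndices; infer_instance

def pvWitness_startingIndices : String × List String := ("barfoothefoobar", ["foo", "bar"])

def Spec_startingIndices (s : String) (words : List String) (out : List Int) : Prop :=
  out = startingIndices_alt s words
instance (s : String) (words : List String) (out : List Int) :
    Decidable (Spec_startingIndices s words out) := by
  unfold Spec_startingIndices; infer_instance

-- ===== CLAIM (what is proved, stated in full; the proofs are below) =====
def Claim_equal_startingIndices : Prop :=
  ∀ (s : String) (words : List String), Dom_startingIndices s words →
    Pre_startingIndices s words →
    Spec_startingIndices s words (startingIndices s words)

-- ===== LEMMAS AND PROOFS =====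

lemma pvMatchB_length (s : String) (S : PySem.Set String) (L : Int) :
    (pvMatchB s S L).length = s.toList.length := by
  simp [pvMatchB]

lemma pvMatchB_getD (s : String) (S : PySem.Set String) (L : Int) (i : Int)
    (h0 : 0 ≤ i) (hn : i < (s.toList.length : Int)) :
    PySem.List.pyGetD (pvMatchB s S L) i false
      = S.contains (PySem.Str.slice s (some i) (some (i + L))) := by
  rw [PySem.List.pyGetD_of_nonneg _ _ h0]
  have hk : i.toNat < s.toList.length := by omega
  have hi : ((i.toNat : Nat) : Int) = i := Int.toNat_of_nonneg h0
  unfold pvMatchB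
  rw [List.getD_eq_getElem?_getD, List.getElem?_map, List.getElem?_range hk]
  simp [hi]

lemma pvSlice_ne_empty (s : String) (L i : Int) (hL : 1 ≤ L)
    (h0 : 0 ≤ i) (hn : i < (s.toList.length : Int)) :
    PySem.Str.slice s (some i) (some (i + L)) ≠ "" := by
  obtain ⟨a, rfl⟩ : ∃ a : Nat, i = (a : Int) := ⟨i.toNat, (Int.toNat_of_nonneg h0).symm⟩
  obtain ⟨b, rfl⟩ : ∃ b : Nat, L = (b : Int) := ⟨L.toNat, by omega⟩
  intro h
  have h2 := congrArg String.toList h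
  rw [PySem.Str.toList_slice] at h2
  simp only [PySem.Chars.slice_eq_listSlice, PySem.List.slice_natCast_add] at h2
  have h3 := congrArg List.length h2
  rw [List.length_take, List.length_drop] at h3
  have he : ("" : String).toList = [] := rfl
  rw [he, List.length_nil] at h3
  omega

lemma pvChainB_ge (n L : Int) (m : List Bool) (hL : 1 ≤ L) (f : Nat) :
    ∀ i : Int, i ≤ pvChainB n L m f i := by
  induction f with
  | zero => intro i; simp [pvChainB]
  | succ f ih =>
    intro i
    simp only [pvChainB]
    split
    · exact le_trans (by omega) (ih (i + L))
    · exact le_refl i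

lemma pvChainB_fuel (n L : Int) (m : List Bool) (hL : 1 ≤ L) (f : Nat) :
    ∀ (g : Nat) (i : Int), 0 ≤ i → (n - i).toNat < f → (n - i).toNat < g →
      pvChainB n L m f i = pvChainB n L m g i := by
  induction f with
  | zero => intro g i _ hf _; omega
  | succ f ih =>
    intro g i h0 hf hg
    match g with
    | 0 => omega
    | g + 1 =>
      simp only [pvChainB]
      split
      · rename_i hcond
        exact ih g (i + L) (by omega) (by omega) (by omega)
      · rfl

lemma pvLoopB_fuel (n L : Int) (m : List Bool) (hL : 1 ≤ L) (f : Nat) :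
    ∀ (g : Nat) (i : Int), 0 ≤ i → (n - i).toNat < f → (n - i).toNat < g →
      pvLoopB n L m f i = pvLoopB n L m g i := by
  induction f with
  | zero => intro g i _ hf _; omega
  | succ f ih =>
    intro g i h0 hf hg
    match g with
    | 0 => omega
    | g + 1 =>
      simp only [pvLoopB]
      by_cases hi : i < n
      · rw [if_pos hi, if_pos hi]
        by_cases hb : PySem.List.pyGetD m i false
        · rw [if_pos hb, if_pos hb]
          have hge := pvChainB_ge n L m hL (m.length + 1) (i + L)
          rw [ih g (pvChainB n L m (m.length + 1) (i + L)) (by omega) (by omega) (by omega)]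
        · rw [if_neg hb, if_neg hb]
          rw [ih g (i + 1) (by omega) (by omega) (by omega)]
      · rw [if_neg hi, if_neg hi]

lemma pvMain (s : String) (S : PySem.Set String) (L : Int) (hL : 1 ≤ L) (f : Nat) :
    ∀ i : Int, 0 ≤ i → ((s.toList.length : Int) - i).toNat < f →
      (pvLoopA s S L (s.toList.length : Int) f i none
         = pvLoopB (s.toList.length : Int) L (pvMatchB s S L) (s.toList.length + 1) i)
      ∧ (∀ w : String, w ≠ "" →
          pvLoopA s S L (s.toList.length : Int) f i (some w)
            = pvLoopB (s.toList.length : Int) L (pvMatchB s S L) (s.toList.length + 1)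
                (pvChainB (s.toList.length : Int) L (pvMatchB s S L)
                  ((pvMatchB s S L).length + 1) i)) := by
  induction f with
  | zero => intro i _ hf; omega
  | succ f ih =>
    intro i h0 hf
    set len := s.toList.length with hlen
    set m := pvMatchB s S L with hm
    have hmlen : m.length = len := pvMatchB_length s S L
    constructor
    · -- prev = None
      by_cases hi : i < (len : Int)
      · have hstep : i + (L - 1) + 1 = i + L := by ring
        have hgetD := pvMatchB_getD s S L i h0 hi
        rw [← hm] at hgetD
        by_cases hb : S.contains (PySem.Str.slice s (some i) (some (i + L))) = true
        · -- window matches: A appends, B appends and chains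
          have hcur := pvSlice_ne_empty s L i hL h0 hi
          have hQ := (ih (i + L) (by omega) (by omega)).2
            (PySem.Str.slice s (some i) (some (i + L))) hcur
          have hge := pvChainB_ge (len : Int) L m hL (m.length + 1) (i + L)
          simp only [pvLoopA, pvLoopB, if_pos hi, hgetD, if_pos hb, hstep,
            Option.getD_none, if_true, List.singleton_append]
          rw [hQ, pvLoopB_fuel (len : Int) L m hL (len + 1) len
            (pvChainB (len : Int) L m (m.length + 1) (i + L)) (by omega) (by omega) (by omega)]
        · -- no match: both step to i+1
          have hP := (ih (i + 1) (by omega) (by omega)).1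
          simp only [pvLoopA, pvLoopB, if_pos hi, hgetD, if_neg hb]
          rw [hP, pvLoopB_fuel (len : Int) L m hL (len + 1) len (i + 1)
            (by omega) (by omega) (by omega)]
      · simp only [pvLoopA, pvLoopB, if_neg hi]
    · -- prev = some w, w truthy: A is mid-chain, B is inside the inner while
      intro w hw
      by_cases hi : i < (len : Int)
      · have hstep : i + (L - 1) + 1 = i + L := by ring
        have hgetD := pvMatchB_getD s S L i h0 hi
        rw [← hm] at hgetD
        by_cases hb : S.contains (PySem.Str.slice s (some i) (some (i + L))) = true
        · have hcur := pvSlice_ne_empty s L i hL h0 hi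
          have hQ := (ih (i + L) (by omega) (by omega)).2
            (PySem.Str.slice s (some i) (some (i + L))) hcur
          -- chain takes one step from i to i+L
          have h1 : pvChainB (len : Int) L m (m.length + 1) i
              = pvChainB (len : Int) L m m.length (i + L) := by
            simp only [pvChainB]
            rw [if_pos ⟨hi, by rw [hgetD]; exact hb⟩]
          have hchain : pvChainB (len : Int) L m (m.length + 1) i
              = pvChainB (len : Int) L m (m.length + 1) (i + L) :=
            h1.trans (pvChainB_fuel (len : Int) L m hL m.length (m.length + 1) (i + L)
              (by omega) (by omega) (by omega))
          simp only [pvLoopA, if_pos hi, if_pos hb, hstep,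
            Option.getD_some, if_neg hw, List.nil_append]

          rw [hQ, hchain]
        · have hP := (ih (i + 1) (by omega) (by omega)).1
          have hchain : pvChainB (len : Int) L m (m.length + 1) i = i := by
            simp only [pvChainB]
            rw [if_neg]
            intro hc
            rw [hgetD] at hc
            exact hb hc.2
          simp only [pvLoopA, if_pos hi, if_neg hb]
          rw [hP, hchain,
            pvLoopB_fuel (len : Int) L m hL (len + 1) len (i + 1)
              (by omega) (by omega) (by omega)]
          conv_rhs => rw [pvLoopB]
          rw [if_pos hi, hgetD, if_neg hb]
      · have hchain : pvChainB (len : Int) L m (m.length + 1) i = i := by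
          simp only [pvChainB]
          rw [if_neg]
          intro hc
          exact hi hc.1
        simp only [pvLoopA, if_neg hi, hchain]
        simp only [pvLoopB, if_neg hi]

-- ===== VERDICT (by name: the statement is the Claim_ definition above) =====
theorem startingIndices_spec : Claim_equal_startingIndices := by
  intro s words _ hpre
  unfold Spec_startingIndices
  match words with
  | [] => rfl
  | w :: ws =>
    simp only [startingIndices, startingIndices_alt]
    rcases hpre with h | h | h
    · exact absurd h (by simp)
    · -- s is empty: both loops exit at once
      simp [pvLoopA, pvLoopB, PySem.Str.len_eq, h]
    · -- normal case: the first word is nonempty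
      rw [PySem.Str.len_eq] at h ⊢
      simp only [List.headD_cons] at h
      have hmlen : (pvMatchB s (PySem.Set.ofList (w :: ws)) ((w.toList.length : Nat) : Int)).length
          = s.toList.length := pvMatchB_length _ _ _
      rw [hmlen]
      exact (pvMain s (PySem.Set.ofList (w :: ws)) ((w.toList.length : Nat) : Int)
        (by exact_mod_cast h) (s.toList.length + 1) 0 le_rfl (by omega)).1
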